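-- pv_equiv track=rewrite | github.com/pratham-rajesh/OpenSource-Scout | feature_engineering.py | encode_language
-- ===== SOURCE A (Python) =====
-- def encode_language(language, user_languages):
--     """
--     Encoding programming language with user proficiency context.
--     Returns match score and proficiency level.
--     """
--     # Creating language proficiency map
--     lang_map = {}
--     for i, lang in enumerate(user_languages):
--         lang_name = lang[0] if isinstance(lang, tuple) else lang
--         lang_count = lang[1] if isinstance(lang, tuple) else 1
--         lang_map[lang_name] = {
--             'rank': i + 1,
--             'count': lang_count,
--             'proficiency': max(1, 10 - i)
--         }
--
--     # Encoding issue language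
--     if language in lang_map:
--         return {
--             'language_known': 1,
--             'language_rank': lang_map[language]['rank'],
--             'language_proficiency': lang_map[language]['proficiency'],
--             'language_repo_count': lang_map[language]['count']
--         }
--     else:
--         return {
--             'language_known': 0,
--             'language_rank': 99,
--             'language_proficiency': 0,
--             'language_repo_count': 0
--         }
-- ===== SOURCE B (Python) =====
-- def encode_language(language, user_languages):
--     """
--     Backward scan with early return: the last matching occurrence in
--     user_languages is the first match when scanning from the end, so we
--     stop as soon as it is found instead of building a language map.
--     """
--     n = len(user_languages)
--     for j, lang in enumerate(reversed(user_languages)):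
--         lang_name = lang[0] if isinstance(lang, tuple) else lang
--         lang_count = lang[1] if isinstance(lang, tuple) else 1
--         if lang_name == language:
--             i = n - 1 - j
--             return {
--                 'language_known': 1,
--                 'language_rank': i + 1,
--                 'language_proficiency': max(1, 10 - i),
--                 'language_repo_count': lang_count
--             }
--     return {
--         'language_known': 0,
--         'language_rank': 99,
--         'language_proficiency': 0,
--         'language_repo_count': 0
--     }
-- ===== Notes on version B (the rewrite author's own statement) =====
-- stated objective: alternative
-- what changed: Replaces A's forward pass building a dict over all entries (then indexed) by a backward scan that early-returns at the first match from the end, which is exactly A's last-occurrence-wins entry; no map is built and the scan stops early.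
import Mathlib
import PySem

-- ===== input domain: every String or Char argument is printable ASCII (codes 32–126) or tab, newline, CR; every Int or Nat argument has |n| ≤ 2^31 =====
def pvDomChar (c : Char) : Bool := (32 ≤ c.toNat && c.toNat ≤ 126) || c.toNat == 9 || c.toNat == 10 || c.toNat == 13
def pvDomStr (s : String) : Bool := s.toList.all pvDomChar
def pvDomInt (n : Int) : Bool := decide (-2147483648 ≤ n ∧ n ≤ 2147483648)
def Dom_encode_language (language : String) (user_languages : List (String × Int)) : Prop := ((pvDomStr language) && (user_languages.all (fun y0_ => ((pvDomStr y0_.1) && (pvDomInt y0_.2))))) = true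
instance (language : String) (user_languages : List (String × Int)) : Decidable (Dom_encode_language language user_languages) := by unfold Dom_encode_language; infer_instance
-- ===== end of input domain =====

-- B replaces A's forward pass building a full language dict (then indexed) by a backward
-- scan that early-returns at the first match from the end (= A's last-occurrence entry).


-- ===== PORT A =====
-- lang_map : name → (rank, count, proficiency); entries are (String, Int) pairs, so the
-- isinstance(tuple) branch always takes lang[0] / lang[1].
def encode_language (language : String) (user_languages : List (String × Int)) : List (String × Int) :=
  match ((PySem.List.enumerate user_languages 0).foldl
      (fun d p => d.insert p.2.1 (p.1 + 1, p.2.2, max 1 (10 - p.1)))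
      (PySem.Dict.empty : PySem.Dict String (Int × Int × Int))).get? language with
  | some rcp =>
      [("language_known", 1), ("language_rank", rcp.1),
       ("language_proficiency", rcp.2.2), ("language_repo_count", rcp.2.1)]
  | none =>
      [("language_known", 0), ("language_rank", 99),
       ("language_proficiency", 0), ("language_repo_count", 0)]

-- ===== PORT B =====
-- Loop body of B: scan the reversed list with counter j; early return at the first match.
def encode_language_altGo (language : String) (n : Int) : Int → List (String × Int) → List (String × Int)
  | _, [] =>
      [("language_known", 0), ("language_rank", 99),
       ("language_proficiency", 0), ("language_repo_count", 0)]
  | j, (name, cnt) :: rest =>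
      if name = language then
        [("language_known", 1), ("language_rank", (n - 1 - j) + 1),
         ("language_proficiency", max 1 (10 - (n - 1 - j))), ("language_repo_count", cnt)]
      else encode_language_altGo language n (j + 1) rest

def encode_language_alt (language : String) (user_languages : List (String × Int)) : List (String × Int) :=
  encode_language_altGo language (user_languages.length : Int) 0 user_languages.reverse

-- ===== PRECONDITION & SPEC =====
def Spec_encode_language (language : String) (user_languages : List (String × Int)) (out : List (String × Int)) : Prop := out = encode_language_alt language user_languages
instance (language : String) (user_languages : List (String × Int)) (out : List (String × Int)) : Decidable (Spec_encode_language language user_languages out) := by unfold Spec_encode_language; infer_instance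

-- ===== CLAIM =====
def Claim_equal_encode_language : Prop := ∀ (language : String) (user_languages : List (String × Int)), Dom_encode_language language user_languages → Spec_encode_language language user_languages (encode_language language user_languages)

-- ===== LEMMAS AND PROOFS =====

-- Abbreviation used only by the proofs: A's overwrite-fold ("last match wins") over the
-- enumerated list, kept as an Option (index, count).
def pvLastMatch (language : String) (l : List (String × Int)) : Option (Int × Int) :=
  (PySem.List.enumerate l 0).foldl
    (fun acc p => if p.2.1 = language then some (p.1, p.2.2) else acc) none

def pvRender (n : Int) : Option (Int × Int) → List (String × Int)
  | some q =>
      [("language_known", 1), ("language_rank", q.1 + 1),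
       ("language_proficiency", max 1 (10 - q.1)), ("language_repo_count", q.2)]
  | none =>
      [("language_known", 0), ("language_rank", 99),
       ("language_proficiency", 0), ("language_repo_count", 0)]

-- A's dict lookup equals the overwrite-fold, mapped to (rank, count, proficiency).
theorem pv_loop_inv (language : String) :
    ∀ (l : List (Int × (String × Int))) (d : PySem.Dict String (Int × Int × Int))
      (acc : Option (Int × Int)),
      d.get? language = acc.map (fun q => (q.1 + 1, q.2, max 1 (10 - q.1))) →
      (l.foldl (fun d p => d.insert p.2.1 (p.1 + 1, p.2.2, max 1 (10 - p.1))) d).get? language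
        = (l.foldl (fun acc p => if p.2.1 = language then some (p.1, p.2.2) else acc) acc).map
            (fun q => (q.1 + 1, q.2, max 1 (10 - q.1))) := by
  intro l
  induction l with
  | nil => intro d acc h; simpa using h
  | cons p rest ih =>
      intro d acc h
      simp only [List.foldl_cons]
      apply ih
      by_cases hn : p.2.1 = language
      · subst hn
        rw [PySem.Dict.get?_insert_self]
        simp
      · rw [PySem.Dict.get?_insert_of_ne d _ (fun he => hn he.symm)]
        simp [hn, h]

-- B's backward early-return scan computes the rendering of the overwrite-fold.
theorem pv_altGo_lastMatch (language : String) (n : Int) :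
    ∀ (l : List (String × Int)),
      encode_language_altGo language n (n - l.length) l.reverse
        = pvRender n (pvLastMatch language l) := by
  intro l
  induction l using List.reverseRecOn with
  | nil => simp [encode_language_altGo, pvLastMatch, pvRender, PySem.List.enumerate]
  | append_singleton l' x ih =>
      rcases x with ⟨name, cnt⟩
      have henum : PySem.List.enumerate (l' ++ [(name, cnt)]) 0
          = PySem.List.enumerate l' 0 ++ [((l'.length : Int), (name, cnt))] := by
        simpa using PySem.List.enumerate_append (xs := l') (ys := [(name, cnt)]) (s := 0)
      rw [List.reverse_append]
      simp only [List.reverse_singleton, List.singleton_append, List.length_append,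
        List.length_singleton]
      rw [show encode_language_altGo language n (n - ((l'.length + 1 : Nat) : Int))
            ((name, cnt) :: l'.reverse)
          = if name = language then
              [("language_known", 1), ("language_rank", (n - 1 - (n - ((l'.length + 1 : Nat) : Int))) + 1),
               ("language_proficiency", max 1 (10 - (n - 1 - (n - ((l'.length + 1 : Nat) : Int))))),
               ("language_repo_count", cnt)]
            else encode_language_altGo language n ((n - ((l'.length + 1 : Nat) : Int)) + 1) l'.reverse
          from rfl]
      unfold pvLastMatch
      rw [henum, List.foldl_append]
      by_cases hm : name = language
      · simp only [hm, List.foldl_cons, List.foldl_nil, if_true]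
        have h1 : n - 1 - (n - ((l'.length + 1 : Nat) : Int)) = (l'.length : Int) := by
          push_cast; omega
        simp [pvRender, h1]
      · simp only [List.foldl_cons, List.foldl_nil, if_neg hm]
        have h2 : (n - ((l'.length + 1 : Nat) : Int)) + 1 = n - (l'.length : Int) := by
          push_cast; omega
        rw [h2]
        simpa [pvLastMatch] using ih

-- ===== VERDICT =====
theorem encode_language_spec : Claim_equal_encode_language := by
  intro language user_languages _
  unfold Spec_encode_language encode_language encode_language_alt
  rw [pv_loop_inv language (PySem.List.enumerate user_languages 0) PySem.Dict.empty none (by simp)]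
  have h := pv_altGo_lastMatch language (user_languages.length : Int) user_languages
  rw [show ((user_languages.length : Int) - (user_languages.length : Int) : Int) = 0 by omega] at h
  rw [h]
  unfold pvLastMatch
  cases (PySem.List.enumerate user_languages 0).foldl
      (fun acc p => if p.2.1 = language then some (p.1, p.2.2) else acc) none <;>
    simp [pvRender]
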